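-- pv_equiv track=rewrite | github.com/organwalk/ai-tech-agent | services/rag_eval_service.py | _diagnose_zero_metrics
-- ===== SOURCE A (Python) =====
-- from typing import Dict, List, Tuple
--
-- def _diagnose_zero_metrics(sample_reports: List[Dict]) -> str:
--     valid_reports = [item for item in sample_reports if item.get("valid")]
--     if not valid_reports:
--         return "all metrics are zero because there are no valid samples."
--
--     if all(item.get("retrieved_count", 0) == 0 for item in valid_reports):
--         return "all core metrics are zero; likely cause: retrieval returned empty results (index/filter mismatch)."
--
--     with_filter = [item for item in valid_reports if item.get("filter_file_ids")]
--     if with_filter and len(with_filter) == len(valid_reports):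
--         return "all core metrics are zero; likely cause: file_ids filter too strict or mismatched relevant_file_ids."
--
--     return "all core metrics are zero; likely cause: labels mismatched with indexed file_id values."
-- ===== SOURCE B (Python) =====
-- from typing import Dict, List
--
-- MESSAGES = [
--     "all metrics are zero because there are no valid samples.",
--     "all core metrics are zero; likely cause: retrieval returned empty results (index/filter mismatch).",
--     "all core metrics are zero; likely cause: file_ids filter too strict or mismatched relevant_file_ids.",
--     "all core metrics are zero; likely cause: labels mismatched with indexed file_id values.",
-- ]
--
-- def _diagnose_zero_metrics(sample_reports: List[Dict]) -> str:
--     # One pass, OR-ing a 3-bit evidence mask per item; the message is a table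
--     # lookup on which evidence bits were never set.
--     # bit 4: some valid sample exists; bit 1: some valid sample retrieved something;
--     # bit 2: some valid sample has no file_ids filter.
--     m = 0
--     for item in sample_reports:
--         if item.get("valid"):
--             m |= 4
--             if item.get("retrieved_count", 0) != 0:
--                 m |= 1
--             if not item.get("filter_file_ids"):
--                 m |= 2
--     if not m & 4:
--         idx = 0
--     elif not m & 1:
--         idx = 1
--     elif not m & 2:
--         idx = 2
--     else:
--         idx = 3
--     return MESSAGES[idx]
-- ===== Notes on version B (the rewrite author's own statement) =====
-- stated objective: alternative
-- what changed: Replaces A's staged list filters and universal checks (valid_reports, all(), with_filter with length comparison) by a single pass OR-ing a 3-bit counter-evidence mask per item, then selecting the message by a table lookup driven by which evidence bit is missing.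
import Mathlib
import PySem

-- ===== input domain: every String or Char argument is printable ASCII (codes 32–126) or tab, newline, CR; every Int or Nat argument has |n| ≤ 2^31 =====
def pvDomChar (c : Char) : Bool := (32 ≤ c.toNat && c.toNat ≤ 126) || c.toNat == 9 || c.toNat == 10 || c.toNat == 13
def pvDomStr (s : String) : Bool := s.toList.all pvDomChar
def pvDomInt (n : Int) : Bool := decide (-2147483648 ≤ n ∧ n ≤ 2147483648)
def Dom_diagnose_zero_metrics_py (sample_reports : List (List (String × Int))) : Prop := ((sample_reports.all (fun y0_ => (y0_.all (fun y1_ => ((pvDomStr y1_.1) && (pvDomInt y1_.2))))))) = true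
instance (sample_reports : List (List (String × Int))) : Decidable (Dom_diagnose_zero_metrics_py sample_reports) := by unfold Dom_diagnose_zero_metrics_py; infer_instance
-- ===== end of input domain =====

-- B replaces A's staged list filters and universal checks by a single pass that ORs a
-- 3-bit evidence mask per item and then picks the message by a table lookup (objective: alternative).

-- truthiness of item.get(k): missing key or value 0 is falsy (values are ints on this domain)
def pvTruthyGet (item : List (String × Int)) (k : String) : Bool :=
  ((PySem.Dict.mk item).get? k).getD 0 != 0

-- ===== PORT A =====
def diagnose_zero_metrics_py (sample_reports : List (List (String × Int))) : String :=
  let valid_reports := sample_reports.filter (fun item => pvTruthyGet item "valid")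
  if valid_reports.isEmpty then
    "all metrics are zero because there are no valid samples."
  else if valid_reports.all (fun item => (PySem.Dict.mk item).getD "retrieved_count" 0 == 0) then
    "all core metrics are zero; likely cause: retrieval returned empty results (index/filter mismatch)."
  else
    let with_filter := valid_reports.filter (fun item => pvTruthyGet item "filter_file_ids")
    if !with_filter.isEmpty && (with_filter.length == valid_reports.length) then
      "all core metrics are zero; likely cause: file_ids filter too strict or mismatched relevant_file_ids."
    else
      "all core metrics are zero; likely cause: labels mismatched with indexed file_id values."

-- ===== PORT B =====
def pvMessages : List String :=
  [ "all metrics are zero because there are no valid samples."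
  , "all core metrics are zero; likely cause: retrieval returned empty results (index/filter mismatch)."
  , "all core metrics are zero; likely cause: file_ids filter too strict or mismatched relevant_file_ids."
  , "all core metrics are zero; likely cause: labels mismatched with indexed file_id values." ]

def diagnose_zero_metrics_py_alt (sample_reports : List (List (String × Int))) : String :=
  let m := sample_reports.foldl
    (fun (m : Nat) item =>
      if pvTruthyGet item "valid" then
        let m := m ||| 4
        let m := if (PySem.Dict.mk item).getD "retrieved_count" 0 != 0 then m ||| 1 else m
        if !pvTruthyGet item "filter_file_ids" then m ||| 2 else m
      else m)
    0
  let idx : Nat :=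
    if m &&& 4 == 0 then 0
    else if m &&& 1 == 0 then 1
    else if m &&& 2 == 0 then 2
    else 3
  -- MESSAGES[idx]; idx is always < 4, so the getD default is never used
  ((PySem.List.pyGet? pvMessages (idx : Int)).getD "")

-- ===== PRECONDITION & SPEC =====
def Spec_diagnose_zero_metrics_py (sample_reports : List (List (String × Int))) (out : String) : Prop := out = diagnose_zero_metrics_py_alt sample_reports
instance (sample_reports : List (List (String × Int))) (out : String) : Decidable (Spec_diagnose_zero_metrics_py sample_reports out) := by unfold Spec_diagnose_zero_metrics_py; infer_instance

-- ===== CLAIM (what is proved, stated in full; the proofs are below) =====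
def Claim_equal_diagnose_zero_metrics_py : Prop := ∀ (sample_reports : List (List (String × Int))), Dom_diagnose_zero_metrics_py sample_reports → Spec_diagnose_zero_metrics_py sample_reports (diagnose_zero_metrics_py sample_reports)

-- ===== LEMMAS AND PROOFS =====

-- the three item predicates (proof-side abbreviations)
def pvV (item : List (String × Int)) : Bool := pvTruthyGet item "valid"
def pvQ (item : List (String × Int)) : Bool := (PySem.Dict.mk item).getD "retrieved_count" 0 == 0
def pvF (item : List (String × Int)) : Bool := pvTruthyGet item "filter_file_ids"

-- per-item evidence mask
def pvMask (x : List (String × Int)) : Nat :=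
  if pvV x then 4 + (if pvQ x then 0 else 1) + (if pvF x then 0 else 2) else 0

-- combined evidence of a whole list
def pvTarget (l : List (List (String × Int))) : Nat :=
  (if l.any pvV then 4 else 0)
  + (if l.any (fun x => pvV x && !pvQ x) then 1 else 0)
  + (if l.any (fun x => pvV x && !pvF x) then 2 else 0)

theorem pv_step_eq (m : Nat) (x : List (String × Int)) :
    (if pvTruthyGet x "valid" then
        let m1 := m ||| 4
        let m2 := if (PySem.Dict.mk x).getD "retrieved_count" 0 != 0 then m1 ||| 1 else m1
        if !pvTruthyGet x "filter_file_ids" then m2 ||| 2 else m2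
      else m) = m ||| pvMask x := by
  by_cases hv : pvV x <;> by_cases hq : pvQ x <;> by_cases hf : pvF x <;>
    simp [pvMask, pvV, pvQ, pvF] at hv hq hf ⊢ <;>
    simp [hv, hq, hf, Nat.or_assoc]

theorem pv_mask_target (x : List (String × Int)) (l : List (List (String × Int))) :
    pvMask x ||| pvTarget l = pvTarget (x :: l) := by
  by_cases hv : pvV x <;> by_cases hq : pvQ x <;> by_cases hf : pvF x <;>
    by_cases ha : l.any pvV <;> by_cases hb : l.any (fun x => pvV x && !pvQ x) <;>
    by_cases hc : l.any (fun x => pvV x && !pvF x) <;>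
    simp [pvMask, pvTarget, List.any_cons, hv, hq, hf, ha, hb, hc]

theorem pv_fold_target (l : List (List (String × Int))) : ∀ (m0 : Nat),
    l.foldl
      (fun (m : Nat) item =>
        if pvTruthyGet item "valid" then
          let m := m ||| 4
          let m := if (PySem.Dict.mk item).getD "retrieved_count" 0 != 0 then m ||| 1 else m
          if !pvTruthyGet item "filter_file_ids" then m ||| 2 else m
        else m)
      m0 = m0 ||| pvTarget l := by
  induction l with
  | nil => intro m0; simp [pvTarget]
  | cons x xs ih =>
    intro m0
    simp only [List.foldl_cons]
    rw [pv_step_eq, ih, Nat.or_assoc, pv_mask_target]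

-- ===== VERDICT (by name: the statement is the Claim_ definition above) =====
theorem diagnose_zero_metrics_py_spec : Claim_equal_diagnose_zero_metrics_py := by
  intro sr _
  show diagnose_zero_metrics_py sr = diagnose_zero_metrics_py_alt sr
  unfold diagnose_zero_metrics_py diagnose_zero_metrics_py_alt
  rw [pv_fold_target]
  set V := sr.filter (fun item => pvTruthyGet item "valid") with hV
  by_cases ha : sr.any pvV
  · -- some valid item exists
    have hVne : ¬ V.isEmpty = true := by
      rcases List.any_eq_true.mp ha with ⟨x, hx, hvx⟩
      have : x ∈ V := by rw [hV]; exact List.mem_filter.mpr ⟨hx, hvx⟩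
      simp [List.isEmpty_iff]; exact fun h => by simp [h] at this
    by_cases hb : sr.any (fun x => pvV x && !pvQ x)
    · -- not all valid items have retrieved_count 0
      have hAllQ : ¬ V.all (fun item => (PySem.Dict.mk item).getD "retrieved_count" 0 == 0) = true := by
        rcases List.any_eq_true.mp hb with ⟨x, hx, hxp⟩
        simp only [Bool.and_eq_true, Bool.not_eq_true'] at hxp
        intro h
        have hmem : x ∈ V := by rw [hV]; exact List.mem_filter.mpr ⟨hx, hxp.1⟩
        have hxq := List.all_eq_true.mp h x hmem
        simp only [beq_iff_eq] at hxq
        have h2 := hxp.2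
        simp [pvQ, hxq] at h2
      by_cases hc : sr.any (fun x => pvV x && !pvF x)
      · -- some valid item lacks the filter → labels-mismatch message
        have hTgt : pvTarget sr = 7 := by simp [pvTarget, ha, hb, hc]
        have hlen : ¬ ((V.filter (fun item => pvTruthyGet item "filter_file_ids")).length == V.length) = true := by
          rcases List.any_eq_true.mp hc with ⟨x, hx, hxp⟩
          simp only [Bool.and_eq_true, Bool.not_eq_true'] at hxp
          have hmem : x ∈ V := by rw [hV]; exact List.mem_filter.mpr ⟨hx, hxp.1⟩
          simp only [beq_iff_eq]
          intro h
          have hxf := (List.length_filter_eq_length_iff.mp h) x hmem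
          have h2 := hxp.2
          simp [pvF, hxf] at h2
        simp [hVne, hAllQ, hTgt, hlen, PySem.List.pyGet?, PySem.List.pyIdx?, pvMessages]
      · -- every valid item has the filter → filter-too-strict message
        have hTgt : pvTarget sr = 5 := by simp [pvTarget, ha, hb, hc]
        have hAllF : ∀ x ∈ V, pvF x = true := by
          intro x hx
          rcases List.mem_filter.mp (hV ▸ hx) with ⟨hxl, hxv⟩
          by_contra hne
          exact hc (List.any_eq_true.mpr ⟨x, hxl, by
            simp [pvV, hxv, Bool.eq_false_iff.mpr hne]⟩)
        have hFeq : V.filter (fun item => pvTruthyGet item "filter_file_ids") = V := by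
          apply List.filter_eq_self.mpr
          intro x hx; exact hAllF x hx
        simp [hVne, hAllQ, hTgt, hFeq, PySem.List.pyGet?, PySem.List.pyIdx?, pvMessages]
    · -- all valid items have retrieved_count 0 → retrieval-empty message
      have hTgt : pvTarget sr = (if sr.any (fun x => pvV x && !pvF x) then 6 else 4) := by
        by_cases hc : sr.any (fun x => pvV x && !pvF x) <;> simp [pvTarget, ha, hb, hc]
      have hAllQ : V.all (fun item => (PySem.Dict.mk item).getD "retrieved_count" 0 == 0) = true := by
        apply List.all_eq_true.mpr
        intro x hx
        rcases List.mem_filter.mp (hV ▸ hx) with ⟨hxl, hxv⟩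
        by_contra hne
        exact hb (List.any_eq_true.mpr ⟨x, hxl, by
          simp only [Bool.and_eq_true, Bool.not_eq_true']
          exact ⟨hxv, by simpa [pvQ] using Bool.eq_false_iff.mpr hne⟩⟩)
      by_cases hc : sr.any (fun x => pvV x && !pvF x) <;>
        simp [hVne, hAllQ, hTgt, hc, PySem.List.pyGet?, PySem.List.pyIdx?, pvMessages]
  · -- no valid item → no-valid-samples message
    have hVe : V.isEmpty = true := by
      rw [hV, List.isEmpty_iff, List.filter_eq_nil_iff]
      intro x hx
      simp only [List.any_eq_true, not_exists, not_and] at ha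
      simpa [pvV] using fun h => (ha x hx) h
    have hb : ¬ sr.any (fun x => pvV x && !pvQ x) = true := by
      intro h; rcases List.any_eq_true.mp h with ⟨x, hx, hxp⟩
      simp only [List.any_eq_true, not_exists, not_and] at ha
      simp only [Bool.and_eq_true] at hxp
      exact ha x hx hxp.1
    have hc : ¬ sr.any (fun x => pvV x && !pvF x) = true := by
      intro h; rcases List.any_eq_true.mp h with ⟨x, hx, hxp⟩
      simp only [List.any_eq_true, not_exists, not_and] at ha
      simp only [Bool.and_eq_true] at hxp
      exact ha x hx hxp.1
    have hTgt : pvTarget sr = 0 := by simp [pvTarget, ha, hb, hc]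
    simp [hVe, hTgt, PySem.List.pyGet?, PySem.List.pyIdx?, pvMessages]
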